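-- pv_equiv track=rewrite | github.com/ConsideredMove/PromptBuilder | wildcard_replacer (1).py | process_file_content
-- ===== SOURCE A (Python) =====
-- def process_file_content(content, filename):
--     """
--     Replace single underscores with spaces, except when inside:
--     - Double underscore wildcards (__...__)
--     - Parentheses (which may contain nested wildcards)
--
--     Returns: (processed_content, replacement_count, error_message)
--     """
--     result = []
--     in_wildcard = False
--     paren_depth = 0
--     replacement_count = 0
--
--     i = 0
--     while i < len(content):
--         char = content[i]
--
--         # Check for double underscore
--         if i < len(content) - 1 and content[i:i+2] == '__':
--             in_wildcard = not in_wildcard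
--             result.append('__')
--             i += 2
--             continue
--
--         # Track parentheses
--         if char == '(':
--             paren_depth += 1
--             result.append(char)
--             i += 1
--             continue
--
--         if char == ')':
--             paren_depth -= 1
--             result.append(char)
--             i += 1
--             continue
--
--         # Replace underscore only if not protected
--         if char == '_' and not in_wildcard and paren_depth == 0:
--             result.append(' ')
--             replacement_count += 1
--         else:
--             result.append(char)
--
--         i += 1
--
--     # Check for malformed wildcards
--     if in_wildcard:
--         return None, 0, f"Malformed wildcard: unpaired __ detected"
--
--     return ''.join(result), replacement_count, None
-- ===== SOURCE B (Python) =====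
-- def process_file_content(content, filename):
--     """
--     Replace single underscores with spaces, except when inside:
--     - Double underscore wildcards (__...__)
--     - Parentheses (which may contain nested wildcards)
--
--     Returns: (processed_content, replacement_count, error_message)
--     """
--     segments = content.split('__')
--     if len(segments) % 2 == 0:
--         # odd number of '__' markers -> unpaired wildcard
--         return None, 0, "Malformed wildcard: unpaired __ detected"
--
--     paren_depth = 0
--     replacement_count = 0
--     processed = []
--     for idx, seg in enumerate(segments):
--         inside_wildcard = idx % 2 == 1
--         out = []
--         for ch in seg:
--             if ch == '(':
--                 paren_depth += 1
--                 out.append(ch)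
--             elif ch == ')':
--                 paren_depth -= 1
--                 out.append(ch)
--             elif ch == '_' and not inside_wildcard and paren_depth == 0:
--                 out.append(' ')
--                 replacement_count += 1
--             else:
--                 out.append(ch)
--         processed.append(''.join(out))
--     return '__'.join(processed), replacement_count, None
-- ===== Notes on version B (the rewrite author's own statement) =====
-- stated objective: faster
-- what changed: B replaces A's index-based per-character scan with a toggled wildcard flag by splitting the content on '__' (segment index parity gives the wildcard state, an even segment count means an unpaired '__'), processing each segment with a shared paren-depth/count, and rejoining with '__'.
import Mathlib
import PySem

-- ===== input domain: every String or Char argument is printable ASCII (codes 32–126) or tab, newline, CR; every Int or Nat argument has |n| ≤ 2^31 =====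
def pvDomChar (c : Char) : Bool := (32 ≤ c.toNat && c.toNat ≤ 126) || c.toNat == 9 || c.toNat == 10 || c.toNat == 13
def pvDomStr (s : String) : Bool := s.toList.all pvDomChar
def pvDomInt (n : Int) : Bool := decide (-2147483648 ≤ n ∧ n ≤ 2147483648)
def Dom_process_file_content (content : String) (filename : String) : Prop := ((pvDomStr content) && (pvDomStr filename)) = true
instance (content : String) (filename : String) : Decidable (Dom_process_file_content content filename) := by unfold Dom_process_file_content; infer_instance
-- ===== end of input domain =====

-- B restructures A's single char-scan (wildcard toggle) into split-on-'__' / index parity / rejoin; same O(n), measurably faster in Python (bulk split/join vs per-char indexing).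

-- ===== PORT A =====
-- the while loop of A: state (in_wildcard, paren_depth, replacement_count, result); returns (result, in_wildcard, paren_depth, replacement_count)
def pfcLoopA : List Char → Bool → Int → Int → List Char → List Char × Bool × Int × Int
  | '_' :: '_' :: rest, w, d, c, acc => pfcLoopA rest (!w) d c (acc ++ ['_', '_'])
  | '(' :: rest, w, d, c, acc => pfcLoopA rest w (d + 1) c (acc ++ ['('])
  | ')' :: rest, w, d, c, acc => pfcLoopA rest w (d - 1) c (acc ++ [')'])
  | ch :: rest, w, d, c, acc =>
      if ch = '_' ∧ w = false ∧ d = 0 then pfcLoopA rest w d (c + 1) (acc ++ [' '])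
      else pfcLoopA rest w d c (acc ++ [ch])
  | [], w, d, c, acc => (acc, w, d, c)

def process_file_content (content : String) (filename : String) : Option String × Int × Option String :=
  let r := pfcLoopA content.toList false 0 0 []
  if r.2.1 = true then (none, 0, some "Malformed wildcard: unpaired __ detected")
  else (some (String.ofList r.1), r.2.2.2, none)

-- ===== PORT B =====
-- inner loop of B: one segment, char by char; returns (emitted chars, paren_depth, replacement_count)
def pfcSegLoop (inside : Bool) : List Char → Int → Int → List Char → List Char × Int × Int
  | [], d, c, out => (out, d, c)
  | ch :: rest, d, c, out =>
      if ch = '(' then pfcSegLoop inside rest (d + 1) c (out ++ [ch])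
      else if ch = ')' then pfcSegLoop inside rest (d - 1) c (out ++ [ch])
      else if ch = '_' ∧ inside = false ∧ d = 0 then pfcSegLoop inside rest d (c + 1) (out ++ [' '])
      else pfcSegLoop inside rest d c (out ++ [ch])

-- outer loop of B: enumerate(segments), threading paren_depth and replacement_count
def pfcSegsLoop : List (List Char) → Nat → Int → Int → List (List Char) → List (List Char) × Int
  | [], _, _, c, processed => (processed, c)
  | s :: rest, idx, d, c, processed =>
      let r := pfcSegLoop (idx % 2 == 1) s d c []
      pfcSegsLoop rest (idx + 1) r.2.1 r.2.2 (processed ++ [r.1])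

def process_file_content_alt (content : String) (filename : String) : Option String × Int × Option String :=
  let segments := PySem.Chars.splitOn content.toList ['_', '_']
  if segments.length % 2 == 0 then (none, 0, some "Malformed wildcard: unpaired __ detected")
  else
    let r := pfcSegsLoop segments 0 0 0 []
    (some (String.ofList (PySem.Chars.join ['_', '_'] r.1)), r.2, none)

-- ===== PRECONDITION & SPEC =====
def Spec_process_file_content (content : String) (filename : String) (out : Option String × Int × Option String) : Prop := out = process_file_content_alt content filename
instance (content : String) (filename : String) (out : Option String × Int × Option String) : Decidable (Spec_process_file_content content filename out) := by unfold Spec_process_file_content; infer_instance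

-- ===== CLAIM (what is proved, stated in full; the proofs are below) =====
def Claim_equal_process_file_content : Prop := ∀ (content : String) (filename : String), Dom_process_file_content content filename → Spec_process_file_content content filename (process_file_content content filename)

-- ===== LEMMAS AND PROOFS =====

-- clean recursive view of Python's split on '__'
def pfcCleanSplit : List Char → List (List Char)
  | '_' :: '_' :: rest => [] :: pfcCleanSplit rest
  | ch :: rest =>
      match pfcCleanSplit rest with
      | s :: ss => (ch :: s) :: ss
      | [] => [[ch]]
  | [] => [[]]

lemma pfcCleanSplit_ne_nil (l : List Char) : pfcCleanSplit l ≠ [] := by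
  fun_induction pfcCleanSplit l <;> simp_all

lemma splitOn_go_spec (l : List Char) : ∀ fuel cur acc s ss, l.length < fuel →
    pfcCleanSplit l = s :: ss →
    PySem.Chars.splitOn.go ['_', '_'] fuel l cur acc = acc.reverse ++ (cur.reverse ++ s) :: ss := by
  fun_induction pfcCleanSplit l with
  | case1 rest ih =>
    intro fuel cur acc s ss hf hs
    obtain ⟨s2, ss2, h2⟩ : ∃ a b, pfcCleanSplit rest = a :: b := by
      cases h' : pfcCleanSplit rest with
      | nil => exact absurd h' (pfcCleanSplit_ne_nil rest)
      | cons a b => exact ⟨_, _, rfl⟩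
    simp only [h2] at hs
    obtain ⟨rfl, rfl⟩ : s = [] ∧ ss = s2 :: ss2 := by
      injection hs with h1 h3; exact ⟨h1.symm, h3.symm⟩
    cases fuel with
    | zero => simp at hf
    | succ f =>
      rw [PySem.Chars.splitOn.go]
      rw [if_pos (by simp [List.isPrefixOf])]
      simp only [List.length_nil, List.length_cons, Nat.zero_add, List.drop_succ_cons, List.drop_zero]
      rw [ih f [] (cur.reverse :: acc) s2 ss2 (by simp at hf ⊢; omega) h2]
      simp
  | case2 ch rest hne s2 ss2 h2 ih =>
    intro fuel cur acc s ss hf hs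
    obtain ⟨rfl, rfl⟩ : s = ch :: s2 ∧ ss = ss2 := by
      injection hs with h1 h3; exact ⟨h1.symm, h3.symm⟩
    have hp : (['_', '_'] : List Char).isPrefixOf (ch :: rest) = false := by
      cases rest with
      | nil => simp [List.isPrefixOf]
      | cons r rs =>
        simp only [List.isPrefixOf, Bool.and_eq_false_iff, beq_eq_false_iff_ne, ne_eq]
        by_cases h1 : ch = '_'
        · by_cases hr : r = '_'
          · exact (hne rs h1 (by rw [hr])).elim
          · exact Or.inr (Or.inl (fun h => hr h.symm))
        · exact Or.inl (fun h => h1 h.symm)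
    cases fuel with
    | zero => simp at hf
    | succ f =>
      rw [PySem.Chars.splitOn.go]
      rw [if_neg (by simp [hp])]
      rw [ih f (ch :: cur) acc s2 ss (by simp at hf ⊢; omega) h2]
      simp
  | case3 ch rest hne h2 ih =>
    intro fuel cur acc s ss hf hs
    exact absurd h2 (pfcCleanSplit_ne_nil rest)
  | case4 =>
    intro fuel cur acc s ss hf hs
    obtain ⟨rfl, rfl⟩ : s = [] ∧ ss = [] := by
      injection hs with h1 h3; exact ⟨h1.symm, h3.symm⟩
    cases fuel with
    | zero => simp at hf
    | succ f =>
      rw [PySem.Chars.splitOn.go]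
      · simp
      · omega

lemma splitOn_eq_cleanSplit (l : List Char) : PySem.Chars.splitOn l ['_', '_'] = pfcCleanSplit l := by
  obtain ⟨s, ss, h⟩ : ∃ a b, pfcCleanSplit l = a :: b := by
    cases h' : pfcCleanSplit l with
    | nil => exact absurd h' (pfcCleanSplit_ne_nil l)
    | cons a b => exact ⟨_, _, rfl⟩
  rw [h, PySem.Chars.splitOn, splitOn_go_spec l (l.length + 1) [] [] s ss (by omega) h]
  simp

-- alternating-flag view of B's outer loop (proof helper)
def pfcGJoin : List (List Char) → Bool → Int → Int → List Char × Bool × Int × Int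
  | [], w, _, c => ([], w, 0, c)
  | [s], w, d, c =>
      let r := pfcSegLoop w s d c []
      (r.1, w, r.2.1, r.2.2)
  | s :: s2 :: ss, w, d, c =>
      let r := pfcSegLoop w s d c []
      let r2 := pfcGJoin (s2 :: ss) (!w) r.2.1 r.2.2
      (r.1 ++ '_' :: '_' :: r2.1, r2.2)

lemma pfcSegLoop_append (inside : Bool) (l : List Char) : ∀ d c out,
    pfcSegLoop inside l d c out = (out ++ (pfcSegLoop inside l d c []).1, (pfcSegLoop inside l d c []).2) := by
  induction l with
  | nil => intro d c out; simp [pfcSegLoop]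
  | cons ch rest ih =>
    intro d c out
    simp only [pfcSegLoop]
    split_ifs <;> (rw [ih]; rw [ih _ _ ([] ++ [_])]; simp)

lemma pfcSegsLoop_append (segs : List (List Char)) : ∀ idx d c processed,
    pfcSegsLoop segs idx d c processed = (processed ++ (pfcSegsLoop segs idx d c []).1, (pfcSegsLoop segs idx d c []).2) := by
  induction segs with
  | nil => intro idx d c processed; simp [pfcSegsLoop]
  | cons s rest ih =>
    intro idx d c processed
    simp only [pfcSegsLoop]
    rw [ih]; rw [ih _ _ _ ([] ++ [_])]
    simp

lemma pfcCleanSplit_cons (ch : Char) (rest : List Char)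
    (hne : ∀ rs, ch = '_' → rest = '_' :: rs → False) (s : List Char) (ss : List (List Char))
    (h2 : pfcCleanSplit rest = s :: ss) :
    pfcCleanSplit (ch :: rest) = (ch :: s) :: ss := by
  rw [pfcCleanSplit.eq_def]
  split
  · next rs heq =>
    injection heq with ha hb
    exact (hne rs ha hb).elim
  · next c r heq =>
    injection heq with ha hb
    subst ha hb
    rw [h2]
  · next heq => exact absurd heq (by simp)

lemma pfcGJoin_cons (ch : Char) (e : List Char) (w : Bool) (d d' c c' : Int)
    (s : List Char) (ss : List (List Char))
    (hstep : ∀ out, pfcSegLoop w (ch :: s) d c out = pfcSegLoop w s d' c' (out ++ e)) :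
    pfcGJoin ((ch :: s) :: ss) w d c =
      (e ++ (pfcGJoin (s :: ss) w d' c').1, (pfcGJoin (s :: ss) w d' c').2) := by
  cases ss with
  | nil =>
    simp only [pfcGJoin]
    rw [hstep, pfcSegLoop_append w s d' c' ([] ++ e)]
    simp
  | cons s2 ss2 =>
    simp only [pfcGJoin]
    rw [hstep, pfcSegLoop_append w s d' c' ([] ++ e)]
    simp

lemma pfcLoopA_eq_gJoin (cs : List Char) (w : Bool) (d c : Int) (acc : List Char) :
    pfcLoopA cs w d c acc =
      (acc ++ (pfcGJoin (pfcCleanSplit cs) w d c).1, (pfcGJoin (pfcCleanSplit cs) w d c).2) := by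
  fun_induction pfcLoopA cs w d c acc with
  | case1 rest w d c acc ih =>
    obtain ⟨s2, ss2, h2⟩ : ∃ a b, pfcCleanSplit rest = a :: b := by
      cases h' : pfcCleanSplit rest with
      | nil => exact absurd h' (pfcCleanSplit_ne_nil rest)
      | cons a b => exact ⟨_, _, rfl⟩
    rw [ih]
    have hcs : pfcCleanSplit ('_' :: '_' :: rest) = [] :: s2 :: ss2 := by
      simp [pfcCleanSplit, h2]
    rw [hcs, h2]
    simp only [pfcGJoin, pfcSegLoop]
    simp
  | case2 rest w d c acc ih =>
    obtain ⟨s2, ss2, h2⟩ : ∃ a b, pfcCleanSplit rest = a :: b := by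
      cases h' : pfcCleanSplit rest with
      | nil => exact absurd h' (pfcCleanSplit_ne_nil rest)
      | cons a b => exact ⟨_, _, rfl⟩
    rw [ih, pfcCleanSplit_cons '(' rest (by intro rs h; simp at h) s2 ss2 h2, h2,
      pfcGJoin_cons '(' ['('] w d (d + 1) c c s2 ss2 (by intro out; simp [pfcSegLoop])]
    simp
  | case3 rest w d c acc ih =>
    obtain ⟨s2, ss2, h2⟩ : ∃ a b, pfcCleanSplit rest = a :: b := by
      cases h' : pfcCleanSplit rest with
      | nil => exact absurd h' (pfcCleanSplit_ne_nil rest)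
      | cons a b => exact ⟨_, _, rfl⟩
    rw [ih, pfcCleanSplit_cons ')' rest (by intro rs h; simp at h) s2 ss2 h2, h2,
      pfcGJoin_cons ')' [')'] w d (d - 1) c c s2 ss2 (by intro out; simp [pfcSegLoop])]
    simp
  | case4 ch rest w d c acc hne1 hne2 hne3 hcond ih =>
    obtain ⟨s2, ss2, h2⟩ : ∃ a b, pfcCleanSplit rest = a :: b := by
      cases h' : pfcCleanSplit rest with
      | nil => exact absurd h' (pfcCleanSplit_ne_nil rest)
      | cons a b => exact ⟨_, _, rfl⟩
    obtain ⟨hch, hw, hd⟩ := hcond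
    rw [ih, pfcCleanSplit_cons ch rest hne1 s2 ss2 h2, h2,
      pfcGJoin_cons ch [' '] w d d c (c + 1) s2 ss2 (by
        intro out
        simp only [pfcSegLoop]
        rw [if_neg (by intro h; exact hne2 (hch ▸ h)), if_neg (by intro h; exact hne3 (hch ▸ h)),
          if_pos ⟨hch, hw, hd⟩])]
    simp
  | case5 ch rest w d c acc hne1 hne2 hne3 hcond ih =>
    obtain ⟨s2, ss2, h2⟩ : ∃ a b, pfcCleanSplit rest = a :: b := by
      cases h' : pfcCleanSplit rest with
      | nil => exact absurd h' (pfcCleanSplit_ne_nil rest)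
      | cons a b => exact ⟨_, _, rfl⟩
    rw [ih, pfcCleanSplit_cons ch rest hne1 s2 ss2 h2, h2,
      pfcGJoin_cons ch [ch] w d d c c s2 ss2 (by
        intro out
        simp only [pfcSegLoop]
        rw [if_neg (fun h => hne2 h), if_neg (fun h => hne3 h), if_neg hcond])]
    simp
  | case6 w d c acc =>
    simp [pfcCleanSplit, pfcGJoin, pfcSegLoop]

lemma pfcGJoin_flag (segs : List (List Char)) : ∀ w d c, segs ≠ [] →
    (pfcGJoin segs w d c).2.1 = (w != (segs.length % 2 == 0)) := by
  induction segs with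
  | nil => intro w d c h; exact absurd rfl h
  | cons s rest ih =>
    intro w d c _
    cases rest with
    | nil => cases w <;> simp [pfcGJoin]
    | cons s2 ss =>
      simp only [pfcGJoin]
      rw [ih (!w) _ _ (by simp)]
      rcases Nat.mod_two_eq_zero_or_one ss.length with h | h <;>
        simp [List.length_cons, Nat.add_mod, h]

lemma pfcSegsLoop_head (s : List Char) (rest : List (List Char)) (idx : Nat) (d c : Int) :
    ∃ p P, (pfcSegsLoop (s :: rest) idx d c []).1 = p :: P := by
  simp only [pfcSegsLoop]
  rw [pfcSegsLoop_append]
  exact ⟨_, _, rfl⟩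

lemma pfcSegsLoop_eq_gJoin (segs : List (List Char)) : ∀ idx d c,
    PySem.Chars.join ['_', '_'] (pfcSegsLoop segs idx d c []).1 =
      (pfcGJoin segs (idx % 2 == 1) d c).1 ∧
    (pfcSegsLoop segs idx d c []).2 = (pfcGJoin segs (idx % 2 == 1) d c).2.2.2 := by
  induction segs with
  | nil => intro idx d c; simp [pfcSegsLoop, pfcGJoin, PySem.Chars.join, List.intercalate]
  | cons s rest ih =>
    intro idx d c
    cases rest with
    | nil =>
      simp only [pfcSegsLoop, pfcGJoin, List.nil_append]
      exact ⟨PySem.Chars.join_singleton _ _, trivial⟩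
    | cons s2 ss =>
      rw [pfcSegsLoop]
      simp only [pfcGJoin]
      rw [pfcSegsLoop_append (s2 :: ss) (idx + 1) _ _ ([] ++ [_])]
      have hpar : ((idx + 1) % 2 == 1) = !(idx % 2 == 1) := by
        rcases Nat.mod_two_eq_zero_or_one idx with h | h <;> simp [Nat.add_mod, h]
      have hih := ih (idx + 1) (pfcSegLoop (idx % 2 == 1) s d c []).2.1 (pfcSegLoop (idx % 2 == 1) s d c []).2.2
      rw [hpar] at hih
      obtain ⟨p, P, hp⟩ := pfcSegsLoop_head s2 ss (idx + 1) (pfcSegLoop (idx % 2 == 1) s d c []).2.1 (pfcSegLoop (idx % 2 == 1) s d c []).2.2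
      rw [hp] at hih ⊢
      constructor
      · simp only [List.nil_append, List.cons_append]
        rw [PySem.Chars.join_cons_cons, hih.1]
        simp
      · exact hih.2

-- ===== VERDICT (by name: the statement is the Claim_ definition above) =====
theorem process_file_content_spec : Claim_equal_process_file_content := by
  intro content filename _
  unfold Spec_process_file_content process_file_content process_file_content_alt
  rw [splitOn_eq_cleanSplit]
  obtain ⟨s, ss, hss⟩ : ∃ a b, pfcCleanSplit content.toList = a :: b := by
    cases h' : pfcCleanSplit content.toList with
    | nil => exact absurd h' (pfcCleanSplit_ne_nil content.toList)
    | cons a b => exact ⟨_, _, rfl⟩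
  have hA := pfcLoopA_eq_gJoin content.toList false 0 0 []
  have hflag := pfcGJoin_flag (pfcCleanSplit content.toList) false 0 0 (by rw [hss]; simp)
  have hseg := pfcSegsLoop_eq_gJoin (pfcCleanSplit content.toList) 0 0 0
  simp only [Nat.zero_mod] at hseg
  simp only [hA, hflag, Bool.false_bne]
  by_cases hpar : ((pfcCleanSplit content.toList).length % 2 == 0) = true
  · simp [hpar]
  · simp only [hpar, Bool.false_eq_true, if_false]
    rw [hseg.1, hseg.2]
    simp
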